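-- pv_equiv track=rewrite | github.com/nhathuyle2002/CS112_NhatHuy_ThanhNhan | Backtracking/AdditiveNumber.py | check
-- ===== SOURCE A (Python) =====
-- def check(num1, num2, rest):
--     if (len(num1) > 1 and num1[0] == "0") or (len(num2) > 1 and num2[0] == "0"):
--         return False
--     strSum = str(int(num1) + int(num2))
--
--     if strSum == rest:
--         return True
--     elif rest.startswith(strSum):
--         return check(num2, strSum, rest[len(strSum):])
--     else:
--         return False
-- ===== SOURCE B (Python) =====
-- def check(num1, num2, rest):
--     if (len(num1) > 1 and num1[0] == "0") or (len(num2) > 1 and num2[0] == "0"):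
--         return False
--     built = ""
--     prev, cur = num1, num2
--     while True:
--         prev, cur = cur, str(int(prev) + int(cur))
--         built += cur
--         if len(built) >= len(rest):
--             return built == rest
-- ===== Notes on version B (the rewrite author's own statement) =====
-- stated objective: alternative
-- what changed: Replaces A's tail recursion that checks startswith and slices a prefix off `rest` at every step by an iterative loop that accumulates the concatenation of the successive sums and compares it against `rest` once, when it has grown at least as long.
import Mathlib
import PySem

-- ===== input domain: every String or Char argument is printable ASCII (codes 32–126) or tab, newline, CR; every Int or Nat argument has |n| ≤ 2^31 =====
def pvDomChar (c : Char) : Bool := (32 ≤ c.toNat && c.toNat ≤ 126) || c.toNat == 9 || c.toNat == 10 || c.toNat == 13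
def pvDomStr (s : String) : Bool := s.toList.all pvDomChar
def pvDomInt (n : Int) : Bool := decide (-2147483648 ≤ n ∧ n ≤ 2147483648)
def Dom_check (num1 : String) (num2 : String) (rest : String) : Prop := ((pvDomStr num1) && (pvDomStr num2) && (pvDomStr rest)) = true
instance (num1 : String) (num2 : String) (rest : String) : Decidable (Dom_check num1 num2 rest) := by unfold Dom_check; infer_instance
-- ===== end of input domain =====

-- B replaces A's consume-a-prefix recursion (startswith + slice at every step) by an iterative
-- loop that builds the whole concatenation of successive sums and compares it to `rest` once
-- at the end (objective: alternative decomposition, same cost).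

-- str(int) is never the empty string (cited by the termination proofs of both ports)
theorem pvToDigits10_ne_nil (m : Nat) : Nat.toDigits 10 m ≠ [] := by
  rw [Nat.toDigits_eq_if (by norm_num)]
  split <;> simp

theorem pvToChars_ne_nil (n : Int) : PySem.Int.toChars n ≠ [] := by
  unfold PySem.Int.toChars
  split <;> simp [pvToDigits10_ne_nil]

-- ===== PORT A =====
-- the leading-zero guard `len(s) > 1 and s[0] == "0"` (shared verbatim by both Pythons)
def pvGuard (cs : List Char) : Bool := (decide (1 < cs.length)) && (cs[0]? == some '0')

-- int(s); total form of PySem.Int.ofChars? — Pre_check excludes the inputs where Python raises ValueError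
def pvVal (cs : List Char) : Int := (PySem.Int.ofChars? cs).getD 0

def checkAux (num1 : List Char) (num2 : List Char) (rest : List Char) : Bool :=
  if pvGuard num1 || pvGuard num2 then false
  else
    let strSum := PySem.Int.toChars (pvVal num1 + pvVal num2)
    if strSum == rest then true
    else if PySem.Chars.startswith rest strSum then
      checkAux num2 strSum (rest.drop strSum.length)
    else false
termination_by rest.length
decreasing_by
  rename_i h1 h2
  have hpre : PySem.Int.toChars (pvVal num1 + pvVal num2) <+: rest :=
    (PySem.Chars.startswith_iff _ _).mp h2
  have hne := pvToChars_ne_nil (pvVal num1 + pvVal num2)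
  have hlen := hpre.length_le
  have hlt : (PySem.Int.toChars (pvVal num1 + pvVal num2)).length < rest.length := by
    rcases Nat.lt_or_ge (PySem.Int.toChars (pvVal num1 + pvVal num2)).length rest.length with h | h
    · exact h
    · exact absurd (hpre.eq_of_length (Nat.le_antisymm hlen h)) (by simpa using h1)
  simp only [List.length_drop]
  have : 0 < (PySem.Int.toChars (pvVal num1 + pvVal num2)).length := List.length_pos_iff.mpr hne
  omega

def check (num1 : String) (num2 : String) (rest : String) : Bool :=
  checkAux num1.toList num2.toList rest.toList

-- ===== PORT B =====
def buildLoop (prev : List Char) (cur : List Char) (built : List Char) (rest : List Char) : Bool :=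
  let cur' := PySem.Int.toChars (pvVal prev + pvVal cur)
  let built' := built ++ cur'
  if decide (rest.length ≤ built'.length) then built' == rest
  else buildLoop cur cur' built' rest
termination_by rest.length - built.length
decreasing_by
  rename_i h
  have hne := pvToChars_ne_nil (pvVal prev + pvVal cur)
  have hpos : 0 < (PySem.Int.toChars (pvVal prev + pvVal cur)).length := List.length_pos_iff.mpr hne
  simp only [cur', built', List.length_append, decide_eq_true_eq] at h ⊢
  omega

def check_alt (num1 : String) (num2 : String) (rest : String) : Bool :=
  if pvGuard num1.toList || pvGuard num2.toList then false
  else buildLoop num1.toList num2.toList [] rest.toList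

-- ===== PRECONDITION & SPEC =====
-- Pre_check = exactly the inputs where Python A returns: either the leading-zero guard fires
-- (A returns False before calling int()) or both seeds parse as Python ints; otherwise int()
-- raises ValueError (B raises there too).
def Pre_check (num1 : String) (num2 : String) (rest : String) : Prop :=
  (1 < num1.toList.length ∧ num1.toList[0]? = some '0')
  ∨ (1 < num2.toList.length ∧ num2.toList[0]? = some '0')
  ∨ ((PySem.Int.ofStr? num1).isSome ∧ (PySem.Int.ofStr? num2).isSome)
instance (num1 : String) (num2 : String) (rest : String) : Decidable (Pre_check num1 num2 rest) := by
  unfold Pre_check; infer_instance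

def pvWitness_check : String × String × String := ("1", "1", "2")

def Spec_check (num1 : String) (num2 : String) (rest : String) (out : Bool) : Prop := out = check_alt num1 num2 rest
instance (num1 : String) (num2 : String) (rest : String) (out : Bool) : Decidable (Spec_check num1 num2 rest out) := by
  unfold Spec_check; infer_instance

-- ===== CLAIM (what is proved, stated in full; the proofs are below) =====
def Claim_equal_check : Prop := ∀ (num1 : String) (num2 : String) (rest : String), Dom_check num1 num2 rest → Pre_check num1 num2 rest → Spec_check num1 num2 rest (check num1 num2 rest)

-- ===== LEMMAS AND PROOFS =====

-- str(int) never trips the leading-zero guard: "0" has length 1, negatives start with '-',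
-- and str of a positive int has no leading '0'
theorem pvToDigits10_head_ne_zero (m : Nat) (hm : m ≠ 0) :
    (Nat.toDigits 10 m).head? ≠ some '0' := by
  induction m using Nat.strong_induction_on with
  | _ m ih =>
    rw [Nat.toDigits_eq_if (by norm_num)]
    split
    · rename_i h
      interval_cases m <;> simp_all <;> decide
    · rename_i h
      have hq : m / 10 ≠ 0 := by omega
      have hlt : m / 10 < m := by omega
      rcases hd : Nat.toDigits 10 (m / 10) with _ | ⟨c, cs⟩
      · exact absurd hd (pvToDigits10_ne_nil _)
      · have := ih (m / 10) hlt hq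
        rw [hd] at this
        simpa using this

theorem pvGuard_toChars (n : Int) : pvGuard (PySem.Int.toChars n) = false := by
  unfold pvGuard PySem.Int.toChars
  split
  · rename_i h
    simp
  · rename_i h
    by_cases h0 : n.toNat = 0
    · rw [h0, Nat.toDigits_zero]
      simp
    · have := pvToDigits10_head_ne_zero n.toNat h0
      rcases hd : Nat.toDigits 10 n.toNat with _ | ⟨c, cs⟩
      · exact absurd hd (pvToDigits10_ne_nil _)
      · rw [hd] at this
        simp only [List.head?_cons, ne_eq, Option.some.injEq] at this
        simp [this]

-- if `built` is not a prefix of `rest`, the build loop returns false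
theorem buildLoop_not_prefix (k : Nat) :
    ∀ (rest built prev cur : List Char), rest.length - built.length ≤ k →
      ¬ built <+: rest → buildLoop prev cur built rest = false := by
  induction k with
  | zero =>
    intro rest built prev cur hk hnp
    rw [buildLoop]
    have hne := pvToChars_ne_nil (pvVal prev + pvVal cur)
    have hpos : 0 < (PySem.Int.toChars (pvVal prev + pvVal cur)).length :=
      List.length_pos_iff.mpr hne
    rw [if_pos (by simp only [List.length_append, decide_eq_true_eq]; omega)]
    simp only [beq_eq_false_iff_ne, ne_eq]
    intro heq
    exact hnp (heq ▸ List.prefix_append _ _)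
  | succ k ih =>
    intro rest built prev cur hk hnp
    rw [buildLoop]
    have hne := pvToChars_ne_nil (pvVal prev + pvVal cur)
    have hpos : 0 < (PySem.Int.toChars (pvVal prev + pvVal cur)).length :=
      List.length_pos_iff.mpr hne
    split
    · simp only [beq_eq_false_iff_ne, ne_eq]
      intro heq
      exact hnp (heq ▸ List.prefix_append _ _)
    · rename_i hlen
      simp only [List.length_append, decide_eq_true_eq, not_le] at hlen
      apply ih
      · simp only [List.length_append]; omega
      · intro hp
        exact hnp ((List.prefix_append _ _).trans hp)

-- main invariant: while `built` is a prefix of `rest`, the build loop computes exactly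
-- A's recursion on the unconsumed suffix
theorem buildLoop_prefix (k : Nat) :
    ∀ (rest built prev cur : List Char), rest.length - built.length ≤ k →
      built <+: rest → pvGuard prev = false → pvGuard cur = false →
      buildLoop prev cur built rest = checkAux prev cur (rest.drop built.length) := by
  induction k using Nat.strong_induction_on with
  | _ k ih =>
    intro rest built prev cur hk hpre hgp hgc
    obtain ⟨t, rfl⟩ := hpre
    have hne : PySem.Int.toChars (pvVal prev + pvVal cur) ≠ [] := pvToChars_ne_nil _
    have hpos : 0 < (PySem.Int.toChars (pvVal prev + pvVal cur)).length :=
      List.length_pos_iff.mpr hne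
    have hg : ¬ ((pvGuard prev || pvGuard cur) = true) := by simp [hgp, hgc]
    rw [buildLoop, checkAux]
    dsimp only
    rw [List.drop_left]
    conv_rhs => rw [if_neg hg]
    by_cases hle : (built ++ t).length ≤ (built ++ PySem.Int.toChars (pvVal prev + pvVal cur)).length
    · conv_lhs => rw [if_pos (decide_eq_true hle)]
      by_cases heq : PySem.Int.toChars (pvVal prev + pvVal cur) = t
      · conv_rhs => rw [if_pos (by simp [heq])]
        simp [heq]
      · have hsw : PySem.Chars.startswith t (PySem.Int.toChars (pvVal prev + pvVal cur)) = false := by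
          rw [Bool.eq_false_iff, ne_eq, PySem.Chars.startswith_iff]
          intro hp
          have hl : t.length ≤ (PySem.Int.toChars (pvVal prev + pvVal cur)).length := by
            simp only [List.length_append] at hle; omega
          exact heq (hp.eq_of_length (Nat.le_antisymm hp.length_le hl))
        conv_rhs => rw [if_neg (by simp [heq]), if_neg (by simp [hsw])]
        simp [heq]
    · have hdecF := decide_eq_false hle
      conv_lhs => rw [if_neg (by rw [hdecF]; exact Bool.false_ne_true)]
      have hlt : (PySem.Int.toChars (pvVal prev + pvVal cur)).length < t.length := by
        simp only [List.length_append] at hle; omega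
      have hne2 : PySem.Int.toChars (pvVal prev + pvVal cur) ≠ t := by
        intro h; rw [h] at hlt; omega
      conv_rhs => rw [if_neg (by simp [hne2])]
      by_cases hsw : PySem.Chars.startswith t (PySem.Int.toChars (pvVal prev + pvVal cur)) = true
      · conv_rhs => rw [if_pos hsw]
        obtain ⟨u, rfl⟩ := (PySem.Chars.startswith_iff _ _).mp hsw
        have hfuel : (built ++ (PySem.Int.toChars (pvVal prev + pvVal cur) ++ u)).length
            - (built ++ PySem.Int.toChars (pvVal prev + pvVal cur)).length < k := by
          simp only [List.length_append] at hk ⊢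
          omega
        have hih := ih _ hfuel (built ++ (PySem.Int.toChars (pvVal prev + pvVal cur) ++ u))
          (built ++ PySem.Int.toChars (pvVal prev + pvVal cur)) cur
          (PySem.Int.toChars (pvVal prev + pvVal cur)) (le_refl _)
          (by rw [← List.append_assoc]; exact List.prefix_append _ _) hgc (pvGuard_toChars _)
        rw [← List.append_assoc] at hih
        rw [List.drop_left] at hih
        rw [← List.append_assoc, hih, List.drop_left]
      · conv_rhs => rw [if_neg hsw]
        have hnp : ¬ (built ++ PySem.Int.toChars (pvVal prev + pvVal cur)) <+: built ++ t := by
          intro hp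
          exact hsw ((PySem.Chars.startswith_iff _ _).mpr ((List.prefix_append_right_inj built).mp hp))
        exact buildLoop_not_prefix (built ++ t).length (built ++ t)
          (built ++ PySem.Int.toChars (pvVal prev + pvVal cur)) cur
          (PySem.Int.toChars (pvVal prev + pvVal cur)) (by omega) hnp
-- ===== VERDICT (by name: the statement is the Claim_ definition above) =====
theorem check_spec : Claim_equal_check := by
  intro num1 num2 rest _ _
  unfold Spec_check check check_alt
  by_cases hg : (pvGuard num1.toList || pvGuard num2.toList) = true
  · rw [checkAux]
    simp [hg]
  · simp only [Bool.or_eq_true, not_or, Bool.not_eq_true] at hg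
    have := buildLoop_prefix (rest.toList.length) rest.toList [] num1.toList num2.toList
      (by simp) (List.nil_prefix) hg.1 hg.2
    rw [this]
    simp [hg.1, hg.2]
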